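-- pv_equiv track=rewrite | github.com/nichwall/Encryption | decryptor4.py | dig_zero
-- ===== SOURCE A (Python) =====
-- def dig_zero(string,seed):
--     outStr = ''
--     if int(seed[1]) > 1:
--         for i in range(len(string)):
--             if i%(int(seed[1])+1)!=0:
--                 outStr += string[i]
--             else:
--                 pass
--     return(outStr)
-- ===== SOURCE B (Python) =====
-- def dig_zero(string, seed):
--     outStr = ''
--     if int(seed[1]) > 1:
--         step = int(seed[1]) + 1
--         outStr = ''.join(string[b + 1:b + step] for b in range(0, len(string), step))
--     return outStr
-- ===== Notes on version B (the rewrite author's own statement) =====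
-- stated objective: alternative
-- what changed: Instead of scanning every index and filtering with a modulo test while appending one character at a time, B joins the slices of kept characters between the removed positions, stepping through the string in blocks of step = int(seed[1]) + 1.
import Mathlib
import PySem

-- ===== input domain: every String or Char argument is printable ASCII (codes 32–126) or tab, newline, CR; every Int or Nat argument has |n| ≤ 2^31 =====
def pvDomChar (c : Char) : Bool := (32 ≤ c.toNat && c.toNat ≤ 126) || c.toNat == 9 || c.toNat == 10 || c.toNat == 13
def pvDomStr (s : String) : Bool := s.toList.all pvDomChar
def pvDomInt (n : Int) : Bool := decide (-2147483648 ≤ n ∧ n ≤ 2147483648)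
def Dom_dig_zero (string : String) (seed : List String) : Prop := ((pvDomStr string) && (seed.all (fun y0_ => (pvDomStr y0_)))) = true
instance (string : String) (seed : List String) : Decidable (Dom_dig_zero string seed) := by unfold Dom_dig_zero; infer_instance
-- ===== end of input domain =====

-- B removes the characters at positions divisible by int(seed[1])+1 by joining the slices of
-- kept runs between removed positions, instead of A's per-index modulo filter (objective: alternative).

-- ===== PORT A =====
-- outStr = ''; if int(seed[1]) > 1: for i in range(len(string)): if i%(int(seed[1])+1)!=0: outStr += string[i]
-- (int(seed[1]) is re-evaluated where Python evaluates it; Pre_ guarantees index 1 exists and the parse succeeds)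
def dig_zero (string : String) (seed : List String) : String :=
  if (PySem.Int.ofStr? (PySem.List.pyGetD seed 1 "")).getD 0 > 1 then
    String.ofList ((PySem.List.pyRange 0 (PySem.Str.len string) 1).foldl
      (fun acc i => if PySem.Int.mod i ((PySem.Int.ofStr? (PySem.List.pyGetD seed 1 "")).getD 0 + 1) ≠ 0 then
        acc ++ [PySem.List.pyGetD string.toList i ' '] else acc) [])
  else String.ofList []

-- ===== PORT B =====
-- outStr = ''; if int(seed[1]) > 1: step = int(seed[1]) + 1;
--   outStr = ''.join(string[b+1:b+step] for b in range(0, len(string), step))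
def dig_zero_alt (string : String) (seed : List String) : String :=
  if (PySem.Int.ofStr? (PySem.List.pyGetD seed 1 "")).getD 0 > 1 then
    PySem.Str.join "" ((PySem.List.pyRange 0 (PySem.Str.len string)
        ((PySem.Int.ofStr? (PySem.List.pyGetD seed 1 "")).getD 0 + 1)).map
      (fun b => PySem.Str.slice string (some (b + 1))
        (some (b + ((PySem.Int.ofStr? (PySem.List.pyGetD seed 1 "")).getD 0 + 1)))))
  else ""

-- ===== PRECONDITION & SPEC =====
-- Pre_ excludes exactly the inputs where A raises: seed shorter than 2 (IndexError on seed[1])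
-- or seed[1] not parseable by int() (ValueError).
def Pre_dig_zero (string : String) (seed : List String) : Prop :=
  2 ≤ seed.length ∧ (PySem.Int.ofStr? (PySem.List.pyGetD seed 1 "")).isSome = true
instance (string : String) (seed : List String) : Decidable (Pre_dig_zero string seed) := by
  unfold Pre_dig_zero; infer_instance
def pvWitness_dig_zero : String × List String := ("abcdef", ["x", "2"])

def Spec_dig_zero (string : String) (seed : List String) (out : String) : Prop := out = dig_zero_alt string seed
instance (string : String) (seed : List String) (out : String) : Decidable (Spec_dig_zero string seed out) := by unfold Spec_dig_zero; infer_instance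

-- ===== CLAIM (what is proved, stated in full; the proofs are below) =====
def Claim_equal_dig_zero : Prop := ∀ (string : String) (seed : List String), Dom_dig_zero string seed → Pre_dig_zero string seed → Spec_dig_zero string seed (dig_zero string seed)

-- ===== LEMMAS AND PROOFS =====

-- the shape both programs share: drop the head of each block of tn characters, keep the rest
def pvChunk (tn : Nat) : List Char → List Char
  | [] => []
  | _ :: rest => rest.take (tn - 1) ++ pvChunk tn (rest.drop (tn - 1))
termination_by l => l.length
decreasing_by simp

theorem pv_map_getD_range (l : List Char) (n : Nat) (hn : n ≤ l.length) :
    (List.range n).map (fun k => l.getD k ' ') = l.take n := by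
  apply List.ext_getElem
  · simp [Nat.min_eq_left hn]
  · intro i h1 h2
    simp only [List.getElem_map, List.getElem_range, List.getElem_take]
    have hi : i < l.length := by simp at h2; omega
    exact List.getD_eq_getElem l ' ' hi

theorem pv_Aside (t : Nat) :
    ∀ (N : Nat) (l : List Char), l.length ≤ N →
      ((List.range l.length).filter (fun k => decide (¬ (t + 1) ∣ k))).map (fun k => l.getD k ' ')
        = pvChunk (t + 1) l := by
  intro N
  induction N with
  | zero =>
    intro l hl
    have : l = [] := List.eq_nil_of_length_eq_zero (Nat.le_zero.mp hl)
    subst this; simp; rw [pvChunk]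
  | succ N ih =>
    intro l hl
    match l with
    | [] => simp; rw [pvChunk]
    | c :: rest =>
      rw [pvChunk]
      simp only [Nat.add_sub_cancel, List.length_cons]
      have hm1 : 1 ≤ min (t + 1) (rest.length + 1) := by omega
      have hsplit : List.range (rest.length + 1)
          = List.range (min (t + 1) (rest.length + 1))
            ++ (List.range (rest.length + 1 - (t + 1))).map (fun x => (t + 1) + x) := by
        by_cases h : t + 1 ≤ rest.length + 1
        · have h1 : rest.length + 1 = (t + 1) + (rest.length + 1 - (t + 1)) := by omega
          rw [Nat.min_eq_left h]
          calc List.range (rest.length + 1)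
              = List.range ((t + 1) + (rest.length + 1 - (t + 1))) := by rw [← h1]
            _ = _ := List.range_add
        · have h1 : rest.length + 1 - (t + 1) = 0 := by omega
          rw [Nat.min_eq_right (by omega), h1]
          simp
      rw [hsplit, List.filter_append, List.map_append]
      have hpart1 : ((List.range (min (t + 1) (rest.length + 1))).filter
            (fun k => decide (¬ (t + 1) ∣ k))).map (fun k => (c :: rest).getD k ' ')
          = rest.take t := by
        have hm : min (t + 1) (rest.length + 1) = (min (t + 1) (rest.length + 1) - 1) + 1 := by
          omega
        rw [hm, List.range_succ_eq_map, List.filter_cons]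
        have h0 : (decide (¬ (t + 1) ∣ 0)) = false := by simp
        rw [h0]
        simp only [if_neg Bool.false_ne_true]
        have hall : (List.map Nat.succ (List.range (min (t + 1) (rest.length + 1) - 1))).filter
              (fun k => decide (¬ (t + 1) ∣ k))
            = List.map Nat.succ (List.range (min (t + 1) (rest.length + 1) - 1)) := by
          rw [List.filter_eq_self]
          intro a ha
          simp only [List.mem_map, List.mem_range] at ha
          obtain ⟨k, hk, rfl⟩ := ha
          simp only [decide_eq_true_eq]
          intro hdvd
          have := Nat.eq_zero_of_dvd_of_lt hdvd (by omega)
          omega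
        rw [hall, List.map_map]
        have hcomp : ((fun k => (c :: rest).getD k ' ') ∘ Nat.succ)
            = (fun k => rest.getD k ' ') := by
          funext k; simp
        rw [hcomp, pv_map_getD_range rest _ (by omega)]
        by_cases h : t ≤ rest.length
        · have : min (t + 1) (rest.length + 1) - 1 = t := by omega
          rw [this]
        · have : min (t + 1) (rest.length + 1) - 1 = rest.length := by omega
          rw [this, List.take_of_length_le (by omega), List.take_of_length_le (by omega)]
      have hpart2 : (((List.range (rest.length + 1 - (t + 1))).map (fun x => (t + 1) + x)).filter
            (fun k => decide (¬ (t + 1) ∣ k))).map (fun k => (c :: rest).getD k ' ')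
          = pvChunk (t + 1) (rest.drop t) := by
        rw [List.filter_map, List.map_map]
        have hfc : ((fun k => decide (¬ (t + 1) ∣ k)) ∘ (fun x => (t + 1) + x))
            = (fun k => decide (¬ (t + 1) ∣ k)) := by
          funext k
          simp only [Function.comp]
          congr 1
          rw [eq_iff_iff]
          constructor <;> intro h hd <;> apply h
          · exact (Nat.dvd_add_right (dvd_refl (t + 1))).mpr hd
          · exact (Nat.dvd_add_right (dvd_refl (t + 1))).mp hd
        rw [hfc]
        have hgc : ((fun k => (c :: rest).getD k ' ') ∘ (fun x => (t + 1) + x))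
            = (fun k => (rest.drop t).getD k ' ') := by
          funext k
          simp only [Function.comp, List.getD_eq_getElem?_getD]
          have hd : (c :: rest).drop (t + 1) = rest.drop t := List.drop_succ_cons
          rw [← hd, List.getElem?_drop]
        rw [hgc]
        have hlen2 : (rest.drop t).length = rest.length + 1 - (t + 1) := by simp
        rw [← hlen2]
        exact ih _ (by simp at hl ⊢; omega)
      rw [hpart1, hpart2]

theorem pv_Bside (t : Nat) :
    ∀ (N : Nat) (l : List Char), l.length ≤ N →
      (List.range ((l.length + t) / (t + 1))).flatMap
          (fun k => (l.drop ((t + 1) * k + 1)).take t)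
        = pvChunk (t + 1) l := by
  intro N
  induction N with
  | zero =>
    intro l hl
    have : l = [] := List.eq_nil_of_length_eq_zero (Nat.le_zero.mp hl)
    subst this
    rw [pvChunk]
    simp [Nat.div_eq_of_lt (by omega : t < t + 1)]
  | succ N ih =>
    intro l hl
    match l with
    | [] =>
      rw [pvChunk]
      simp [Nat.div_eq_of_lt (by omega : t < t + 1)]
    | c :: rest =>
      rw [pvChunk]
      simp only [Nat.add_sub_cancel, List.length_cons]
      have hm : (rest.length + 1 + t) / (t + 1) = rest.length / (t + 1) + 1 := by
        have h1 : rest.length + 1 + t = rest.length + (t + 1) := by omega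
        rw [h1, Nat.add_div_right _ (by omega)]
      rw [hm, List.range_succ_eq_map, List.flatMap_cons]
      have hk0 : ((c :: rest).drop ((t + 1) * 0 + 1)).take t = rest.take t := by simp
      rw [hk0]
      congr 1
      have hmap : (List.map Nat.succ (List.range (rest.length / (t + 1)))).flatMap
            (fun k => ((c :: rest).drop ((t + 1) * k + 1)).take t)
          = (List.range (rest.length / (t + 1))).flatMap
            (fun k => ((rest.drop t).drop ((t + 1) * k + 1)).take t) := by
        rw [List.flatMap_map]
        congr 1
        funext k
        have h1 : (t + 1) * Nat.succ k + 1 = ((t + 1) * k + 1) + (t + 1) := by simp [Nat.succ_eq_add_one]; ring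
        have h2 : (c :: rest).drop (((t + 1) * k + 1) + (t + 1))
            = ((c :: rest).drop (t + 1)).drop ((t + 1) * k + 1) := by
          rw [List.drop_drop]; congr 1; omega
        rw [h1, h2, List.drop_succ_cons]
      rw [hmap]
      have hlen : rest.length / (t + 1) = ((rest.drop t).length + t) / (t + 1) := by
        simp only [List.length_drop]
        by_cases h : t ≤ rest.length
        · congr 1; omega
        · rw [Nat.div_eq_of_lt (by omega), Nat.div_eq_of_lt (by omega)]
      rw [hlen]
      exact ih _ (by simp at hl ⊢; omega)

theorem pv_join_nil (xs : List (List Char)) : PySem.Chars.join [] xs = xs.flatten := by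
  match xs with
  | [] => simp [PySem.Chars.join_nil]
  | [p] => simp [PySem.Chars.join_singleton]
  | p :: q :: rest =>
    rw [PySem.Chars.join_cons_cons, pv_join_nil (q :: rest)]
    simp


theorem pv_A_reduce (string : String) (t : Nat) :
    ((PySem.List.pyRange 0 (PySem.Str.len string) 1).foldl
      (fun acc i => if PySem.Int.mod i (((t : Int) + 1) + 1) ≠ 0 then
        acc ++ [PySem.List.pyGetD string.toList i ' '] else acc) [])
      = pvChunk (t + 2) string.toList := by
  rw [PySem.List.foldl_append_ite, PySem.Str.len_eq, PySem.List.pyRange_one]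
  simp only [List.nil_append, Int.sub_zero, Int.toNat_natCast]
  rw [List.filter_map, List.map_map]
  have hp : ((fun i => decide (PySem.Int.mod i (((t : Int) + 1) + 1) ≠ 0)) ∘ (fun k : Nat => (0 : Int) + ↑k))
      = (fun k : Nat => decide (¬ (t + 2) ∣ k)) := by
    funext k
    simp only [Function.comp, zero_add]
    congr 1
    rw [eq_iff_iff, not_iff_not]
    rw [PySem.Int.mod_eq_zero_iff_dvd]
    have hc : ((t : Int) + 1) + 1 = ((t + 2 : Nat) : Int) := by push_cast; ring
    rw [hc, Int.natCast_dvd_natCast]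
  have hg : ((fun i => PySem.List.pyGetD string.toList i ' ') ∘ (fun k : Nat => (0 : Int) + ↑k))
      = (fun k : Nat => string.toList.getD k ' ') := by
    funext k
    simp [PySem.List.pyGetD_natCast]
  rw [hp, hg]
  have := pv_Aside (t + 1) string.toList.length string.toList (le_refl _)
  simpa using this

theorem pv_B_reduce (string : String) (t : Nat) :
    (PySem.Str.join "" ((PySem.List.pyRange 0 (PySem.Str.len string) (((t : Int) + 1) + 1)).map
      (fun b => PySem.Str.slice string (some (b + 1)) (some (b + (((t : Int) + 1) + 1)))))).toList
      = pvChunk (t + 2) string.toList := by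
  rw [PySem.Str.toList_join]
  have hemp : ("" : String).toList = [] := rfl
  rw [hemp, pv_join_nil, ← List.flatMap_def]
  rw [PySem.Str.len_eq, PySem.List.pyRange_of_pos 0 ((string.toList.length : Nat) : Int) (by omega : (0:Int) < ((t : Int) + 1) + 1)]
  have hm : (if (0:Int) < (string.toList.length : Int) then
        ((((string.toList.length : Int)) - 0 + (((t : Int) + 1) + 1) - 1) / (((t : Int) + 1) + 1)).toNat
      else 0) = (string.toList.length + (t + 1)) / (t + 2) := by
    by_cases h : (0:Int) < (string.toList.length : Int)
    · rw [if_pos h]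
      have h1 : ((string.toList.length : Int)) - 0 + (((t : Int) + 1) + 1) - 1
          = ((string.toList.length + (t + 1) : Nat) : Int) := by push_cast; ring
      have h2 : ((t : Int) + 1) + 1 = ((t + 2 : Nat) : Int) := by push_cast; ring
      rw [h1, h2, ← Int.natCast_div, Int.toNat_natCast]
    · rw [if_neg h]
      have : string.toList.length = 0 := by omega
      rw [this]
      rw [Nat.div_eq_of_lt (by omega)]
  rw [hm]
  rw [List.map_map, List.flatMap_map]
  have hf : (fun a : Nat => ((((fun b => PySem.Str.slice string (some (b + 1)) (some (b + (((t : Int) + 1) + 1))))) ∘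
        (fun k : Nat => (0 : Int) + (((t : Int) + 1) + 1) * (k : Int))) a).toList)
      = (fun k : Nat => (string.toList.drop ((t + 2) * k + 1)).take (t + 1)) := by
    funext k
    simp only [Function.comp, PySem.Str.toList_slice, PySem.Chars.slice_eq_listSlice, zero_add]
    have ha : ((t : Int) + 1 + 1) * (k : Int) + 1 = (((t + 2) * k + 1 : Nat) : Int) := by
      push_cast; ring
    have hb : ((t : Int) + 1 + 1) * (k : Int) + ((t : Int) + 1 + 1)
        = (((t + 2) * k + (t + 2) : Nat) : Int) := by push_cast; ring
    rw [ha, hb, PySem.List.slice_toNat _ (by positivity) (by positivity)]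
    simp only [Int.toNat_natCast]
    congr 1
    omega
  rw [hf]
  have := pv_Bside (t + 1) string.toList.length string.toList (le_refl _)
  simpa using this

theorem pv_case (string : String) (v : Int) :
    (if v > 1 then
      String.ofList ((PySem.List.pyRange 0 (PySem.Str.len string) 1).foldl
        (fun acc i => if PySem.Int.mod i (v + 1) ≠ 0 then
          acc ++ [PySem.List.pyGetD string.toList i ' '] else acc) [])
    else String.ofList [])
    = (if v > 1 then
      PySem.Str.join "" ((PySem.List.pyRange 0 (PySem.Str.len string) (v + 1)).map
        (fun b => PySem.Str.slice string (some (b + 1)) (some (b + (v + 1)))))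
    else "") := by
  by_cases h : v > 1
  · rw [if_pos h, if_pos h]
    obtain ⟨t, rfl⟩ : ∃ t : Nat, v = (t : Int) + 1 := ⟨(v - 1).toNat, by omega⟩
    rw [← String.toList_inj, String.toList_ofList, pv_A_reduce, pv_B_reduce]
  · rw [if_neg h, if_neg h]

theorem pv_ports_eq (string : String) (seed : List String) :
    dig_zero string seed = dig_zero_alt string seed :=
  pv_case string ((PySem.Int.ofStr? (PySem.List.pyGetD seed 1 "")).getD 0)

-- ===== VERDICT (by name: the statement is the Claim_ definition above) =====
theorem dig_zero_spec : Claim_equal_dig_zero := by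
  intro string seed _ _
  exact pv_ports_eq string seed
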